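-- pv_equiv track=rewrite | github.com/SOP-PP-26/PP | map_problem_resolution.py | map_resolution_with_confidence
-- ===== SOURCE A (Python) =====
-- resolution_map = {
--     'Plumbing issue': ['leak', 'drip', 'pipe'],
--     'Electrical problem': ['switch', 'power', 'electric', 'voltage'],
--     'Mechanical issue': ['noise', 'jam', 'grind'],
--     'Physical damage': ['broken', 'crack', 'dent'],
--     'Performance issue': ['slow', 'lag', 'freeze'],
--     'Software issue': ['error', 'crash', 'bug'],
--     'Overheating': ['heat', 'hot', 'burn'],
--     'Cooling issue': ['cold', 'cool', 'ice']
-- }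
--
-- def map_resolution_with_confidence(description):
--     description = str(description).lower()
--     best_resolution = 'Unknown issue'
--     max_matches = 0
--     confidence = 0
--
--     for resolution, keywords in resolution_map.items():
--         match_count = sum(1 for keyword in keywords if keyword in description)
--         if match_count > max_matches:
--             max_matches = match_count
--             best_resolution = resolution
--             confidence = int((match_count / len(keywords)) * 100)
--
--     return best_resolution, confidence
-- ===== SOURCE B (Python) =====
-- resolution_map = {
--     'Plumbing issue': ['leak', 'drip', 'pipe'],
--     'Electrical problem': ['switch', 'power', 'electric', 'voltage'],
--     'Mechanical issue': ['noise', 'jam', 'grind'],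
--     'Physical damage': ['broken', 'crack', 'dent'],
--     'Performance issue': ['slow', 'lag', 'freeze'],
--     'Software issue': ['error', 'crash', 'bug'],
--     'Overheating': ['heat', 'hot', 'burn'],
--     'Cooling issue': ['cold', 'cool', 'ice']
-- }
--
--
-- def map_resolution_with_confidence(description):
--     d = str(description).lower()
--
--     def best(items):
--         # recursively compute the best (resolution, matches, n_keywords) of the tail,
--         # then let the head override it when the head matches at least as well
--         # (>= keeps the earliest maximal entry, matching first-wins semantics)
--         if not items:
--             return 'Unknown issue', 0, 1
--         (res, kws), rest = items[0], items[1:]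
--         c = sum(kw in d for kw in kws)
--         rb, rc, rl = best(rest)
--         if c >= rc and c > 0:
--             return res, c, len(kws)
--         return rb, rc, rl
--
--     name, n, ln = best(list(resolution_map.items()))
--     return name, (n * 100) // ln if n else 0
-- ===== Notes on version B (the rewrite author's own statement) =====
-- stated objective: alternative
-- what changed: A's single imperative left-to-right loop mutating best/max/confidence is replaced by a recursive right fold: the best of the tail is computed first and the head overrides it when it matches at least as well (>= gives first-wins), with the confidence computed once at the end by integer division.
import Mathlib
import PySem

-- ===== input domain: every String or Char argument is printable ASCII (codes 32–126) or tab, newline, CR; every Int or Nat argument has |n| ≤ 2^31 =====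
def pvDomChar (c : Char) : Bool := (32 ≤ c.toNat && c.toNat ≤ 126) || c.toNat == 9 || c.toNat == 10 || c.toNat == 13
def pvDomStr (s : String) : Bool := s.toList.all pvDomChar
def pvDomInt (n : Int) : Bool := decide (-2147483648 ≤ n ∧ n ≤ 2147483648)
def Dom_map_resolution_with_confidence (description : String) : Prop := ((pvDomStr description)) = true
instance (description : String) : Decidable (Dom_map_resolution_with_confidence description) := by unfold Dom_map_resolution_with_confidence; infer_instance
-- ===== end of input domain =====

-- B replaces A's imperative left-to-right best-tracking loop by a recursive right fold
-- (best of the tail first, head overrides on >=); objective: alternative decomposition, same cost.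

-- ===== PORT A =====
-- the module-level dict, as an association list in insertion order
def resolution_map : List (String × List String) :=
  [("Plumbing issue", ["leak", "drip", "pipe"]),
   ("Electrical problem", ["switch", "power", "electric", "voltage"]),
   ("Mechanical issue", ["noise", "jam", "grind"]),
   ("Physical damage", ["broken", "crack", "dent"]),
   ("Performance issue", ["slow", "lag", "freeze"]),
   ("Software issue", ["error", "crash", "bug"]),
   ("Overheating", ["heat", "hot", "burn"]),
   ("Cooling issue", ["cold", "cool", "ice"])]

-- sum(1 for keyword in keywords if keyword in description)
def pvCount (d : String) (kws : List String) : Int :=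
  kws.foldl (fun acc kw => if PySem.Str.isIn kw d then acc + 1 else acc) 0

-- A's loop body (named so the fold can be reasoned about; a literal transcription).
-- int((match_count / len(keywords)) * 100) is ported as floor division: it is exact here,
-- since match_count ∈ 0..4 and len(keywords) ∈ {3,4} make the float value truncate to
-- exactly match_count*100 // len(keywords).
def stepA (d : String) (st : String × Int × Int) (p : String × List String) : String × Int × Int :=
  let c := pvCount d p.2
  if c > st.2.1 then (p.1, c, PySem.Int.floordiv (c * 100) (p.2.length : Int)) else st

def map_resolution_with_confidence (description : String) : String × Int :=
  let d := PySem.Str.lower description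
  let st := resolution_map.foldl (stepA d) ("Unknown issue", 0, 0)
  (st.1, st.2.2)

-- ===== PORT B =====
-- Source B's recursive helper best(items): best of the tail, overridden by the head on >=
def bestB (d : String) : List (String × List String) → String × Int × Int
  | [] => ("Unknown issue", 0, 1)
  | p :: rest =>
      let c := pvCount d p.2
      let r := bestB d rest
      if c ≥ r.2.1 ∧ c > 0 then (p.1, c, (p.2.length : Int)) else r

def map_resolution_with_confidence_alt (description : String) : String × Int :=
  let d := PySem.Str.lower description
  let r := bestB d resolution_map
  (r.1, if r.2.1 ≠ 0 then PySem.Int.floordiv (r.2.1 * 100) r.2.2 else 0)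

-- ===== PRECONDITION & SPEC =====
def Spec_map_resolution_with_confidence (description : String) (out : String × Int) : Prop := out = map_resolution_with_confidence_alt description
instance (description : String) (out : String × Int) : Decidable (Spec_map_resolution_with_confidence description out) := by unfold Spec_map_resolution_with_confidence; infer_instance

-- ===== CLAIM (what is proved, stated in full; the proofs are below) =====
def Claim_equal_map_resolution_with_confidence : Prop := ∀ (description : String), Dom_map_resolution_with_confidence description → Spec_map_resolution_with_confidence description (map_resolution_with_confidence description)

-- ===== LEMMAS AND PROOFS =====

lemma pvCount_nonneg (d : String) (kws : List String) : 0 ≤ pvCount d kws := by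
  suffices h : ∀ (l : List String) (a : Int), 0 ≤ a →
      0 ≤ l.foldl (fun acc kw => if PySem.Str.isIn kw d then acc + 1 else acc) a by
    exact h kws 0 le_rfl
  intro l
  induction l with
  | nil => intro a ha; simpa using ha
  | cons x t ih =>
      intro a ha
      simp only [List.foldl_cons]
      split
      · exact ih _ (by omega)
      · exact ih _ ha

lemma bestB_count_nonneg (d : String) (L : List (String × List String)) :
    0 ≤ (bestB d L).2.1 := by
  induction L with
  | nil => simp [bestB]
  | cons p t ih =>
      simp only [bestB]
      split
      · exact pvCount_nonneg d p.2
      · exact ih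

-- if no category matched, the recursion returned the base triple
lemma bestB_count_zero (d : String) (L : List (String × List String))
    (h : (bestB d L).2.1 = 0) : bestB d L = ("Unknown issue", 0, 1) := by
  induction L with
  | nil => rfl
  | cons p t ih =>
      have hB : bestB d (p :: t)
          = if pvCount d p.2 ≥ (bestB d t).2.1 ∧ pvCount d p.2 > 0
            then (p.1, pvCount d p.2, (p.2.length : Int)) else bestB d t := rfl
      by_cases hc : pvCount d p.2 ≥ (bestB d t).2.1 ∧ pvCount d p.2 > 0
      · rw [hB, if_pos hc] at h
        simp only at h
        omega
      · rw [hB, if_neg hc] at h ⊢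
        exact ih h

-- coupling: A's left fold from any state st with 0 ≤ count equals B's right recursion,
-- kept when it strictly beats st
lemma fold_eq_bestB (d : String) (L : List (String × List String)) :
    ∀ (st : String × Int × Int), 0 ≤ st.2.1 →
      L.foldl (stepA d) st =
        (if (bestB d L).2.1 > st.2.1
         then ((bestB d L).1, (bestB d L).2.1,
               PySem.Int.floordiv ((bestB d L).2.1 * 100) (bestB d L).2.2)
         else st) := by
  induction L with
  | nil =>
      intro st hst
      simp only [List.foldl_nil, bestB]
      rw [if_neg (by simp; omega)]
  | cons p t ih =>
      intro st hst
      have hc := pvCount_nonneg d p.2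
      have hbt := bestB_count_nonneg d t
      simp only [List.foldl_cons, bestB]
      by_cases h1 : pvCount d p.2 > st.2.1
      · have hA : stepA d st p
            = (p.1, pvCount d p.2, PySem.Int.floordiv (pvCount d p.2 * 100) (p.2.length : Int)) := by
          simp [stepA, h1]
        rw [hA, ih _ (by simp; omega)]
        split_ifs with h2 h3 h3 <;> simp_all <;> omega
      · have hA : stepA d st p = st := by simp [stepA, h1]
        rw [hA, ih _ hst]
        split_ifs with h2 h3 h3 <;> simp_all <;> omega

-- ===== VERDICT (by name: the statement is the Claim_ definition above) =====
theorem map_resolution_with_confidence_spec : Claim_equal_map_resolution_with_confidence := by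
  intro description _
  unfold Spec_map_resolution_with_confidence
  unfold map_resolution_with_confidence map_resolution_with_confidence_alt
  set d := PySem.Str.lower description with hd
  simp only
  rw [fold_eq_bestB d resolution_map ("Unknown issue", 0, 0) (by simp)]
  by_cases h : (bestB d resolution_map).2.1 > 0
  · rw [if_pos h, if_pos (by omega)]
  · have h0 : (bestB d resolution_map).2.1 = 0 := by
      have := bestB_count_nonneg d resolution_map; omega
    rw [if_neg (by omega), bestB_count_zero d _ h0]
    simp
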